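-- pv_equiv track=rewrite | github.com/ArkhipovG/DI-Bootcamp | Week1/Day5/Challenges/code.py | is_mono
-- ===== SOURCE A (Python) =====
-- def is_mono(array):
--     increasing = decreasing = True
--
--     for i in range(1, len(array)):
--         if array[i] < array[i - 1]:
--             increasing = False
--             break
--
--     for i in range(1, len(array)):
--         if array[i] > array[i - 1]:
--             decreasing = False
--             break
--
--     return increasing or decreasing
-- ===== SOURCE B (Python) =====
-- def is_mono(array):
--     inc = dec = True
--     for prev, cur in zip(array, array[1:]):
--         if cur < prev:
--             inc = False
--         if cur > prev:
--             dec = False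
--         if not (inc or dec):
--             return False
--     return inc or dec
-- ===== Notes on version B (the rewrite author's own statement) =====
-- stated objective: alternative
-- what changed: Fuses A's two separate passes (one for increasing, one for decreasing) into a single traversal over adjacent pairs maintaining both flags, with an early return once both are false.
import Mathlib
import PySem

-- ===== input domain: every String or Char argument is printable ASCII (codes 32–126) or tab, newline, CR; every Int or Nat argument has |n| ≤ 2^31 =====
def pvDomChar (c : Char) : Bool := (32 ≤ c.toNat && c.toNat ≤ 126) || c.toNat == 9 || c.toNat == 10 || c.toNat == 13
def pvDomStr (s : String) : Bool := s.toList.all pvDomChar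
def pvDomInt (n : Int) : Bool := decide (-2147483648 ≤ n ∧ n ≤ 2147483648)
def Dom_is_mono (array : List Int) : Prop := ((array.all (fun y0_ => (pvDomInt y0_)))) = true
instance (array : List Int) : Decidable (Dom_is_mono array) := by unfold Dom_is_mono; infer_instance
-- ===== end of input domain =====

-- B fuses A's two passes into one traversal over adjacent pairs with an early exit; same O(n) cost.

-- ===== PORT A =====
-- A's first loop: walk adjacent pairs; on the first descent set increasing=False and break.
def isMonoIncLoop : List Int → Bool
  | a :: b :: rest => if b < a then false else isMonoIncLoop (b :: rest)
  | _ => true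

-- A's second loop: on the first ascent set decreasing=False and break.
def isMonoDecLoop : List Int → Bool
  | a :: b :: rest => if b > a then false else isMonoDecLoop (b :: rest)
  | _ => true

def is_mono (array : List Int) : Bool := isMonoIncLoop array || isMonoDecLoop array

-- ===== PORT B =====
-- B's single loop over zip(array, array[1:]) carrying both flags, early return when both fall.
def isMonoGo (inc dec : Bool) : List Int → Bool
  | a :: b :: rest =>
      let inc' := if b < a then false else inc
      let dec' := if b > a then false else dec
      if !(inc' || dec') then false else isMonoGo inc' dec' (b :: rest)
  | _ => inc || dec

def is_mono_alt (array : List Int) : Bool := isMonoGo true true array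

-- ===== PRECONDITION & SPEC =====
def Spec_is_mono (array : List Int) (out : Bool) : Prop := out = is_mono_alt array
instance (array : List Int) (out : Bool) : Decidable (Spec_is_mono array out) := by unfold Spec_is_mono; infer_instance

-- ===== CLAIM (what is proved, stated in full; the proofs are below) =====
def Claim_equal_is_mono : Prop := ∀ (array : List Int), Dom_is_mono array → Spec_is_mono array (is_mono array)

-- ===== LEMMAS AND PROOFS =====
theorem isMonoGo_eq (l : List Int) : ∀ (inc dec : Bool),
    isMonoGo inc dec l = ((inc && isMonoIncLoop l) || (dec && isMonoDecLoop l)) := by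
  induction l with
  | nil => intro inc dec; simp [isMonoGo, isMonoIncLoop, isMonoDecLoop]
  | cons a t ih =>
    intro inc dec
    cases t with
    | nil => simp [isMonoGo, isMonoIncLoop, isMonoDecLoop]
    | cons b rest =>
      simp only [isMonoGo, isMonoIncLoop, isMonoDecLoop]
      by_cases h1 : b < a
      · have h2 : ¬ b > a := by omega
        simp [h1, h2, ih]
      · by_cases h2 : b > a
        · simp [h1, h2, ih]
        · simp [h1, h2, ih]
          cases inc <;> cases dec <;> simp

-- ===== VERDICT (by name: the statement is the Claim_ definition above) =====
theorem is_mono_spec : Claim_equal_is_mono := by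
  intro array _
  unfold Spec_is_mono is_mono is_mono_alt
  simp [isMonoGo_eq]
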